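-- pv_equiv track=rewrite | github.com/DeebajHaider/xbow-validation-benchmarks | bench_runner.py | parse_benchmark_selection
-- ===== SOURCE A (Python) =====
-- def parse_benchmark_selection(spec: str) -> list[int]:
--     """
--     Parse a comma-separated list of numbers and ranges like '1,5,10-20,78'.
--     Returns a sorted list of unique ints.
--     """
--     nums = set()
--     for part in spec.split(","):
--         part = part.strip()
--         if "-" in part:
--             lo, hi = part.split("-", 1)
--             nums.update(range(int(lo), int(hi) + 1))
--         else:
--             nums.add(int(part))
--     return sorted(nums)
-- ===== SOURCE B (Python) =====
-- def parse_benchmark_selection(spec: str) -> list[int]: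
--     """
--     Parse a comma-separated list of numbers and ranges like '1,5,10-20,78'.
--     Returns a sorted list of unique ints.
--     """
--     ivs = []
--     for part in spec.split(","):
--         part = part.strip()
--         if "-" in part:
--             lo, hi = part.split("-", 1)
--             ivs.append((int(lo), int(hi)))
--         else:
--             n = int(part)
--             ivs.append((n, n))
--     ivs.sort(key=lambda iv: iv[0])
--     merged = []
--     for lo, hi in ivs:
--         if lo > hi:
--             continue
--         if merged and lo <= merged[-1][1] + 1:
--             if hi > merged[-1][1]:
--                 merged[-1] = (merged[-1][0], hi)
--         else:
--             merged.append((lo, hi))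
--     out = []
--     for lo, hi in merged:
--         out.extend(range(lo, hi + 1))
--     return out
-- ===== Notes on version B (the rewrite author's own statement) =====
-- stated objective: faster
-- what changed: A expands every range into individual numbers, dedups them in a hash set and sorts all of them; B parses each part into an (lo,hi) interval, sorts only the intervals, merges overlapping/adjacent intervals in one pass, and emits the numbers once from the disjoint merged intervals.
import Mathlib
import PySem

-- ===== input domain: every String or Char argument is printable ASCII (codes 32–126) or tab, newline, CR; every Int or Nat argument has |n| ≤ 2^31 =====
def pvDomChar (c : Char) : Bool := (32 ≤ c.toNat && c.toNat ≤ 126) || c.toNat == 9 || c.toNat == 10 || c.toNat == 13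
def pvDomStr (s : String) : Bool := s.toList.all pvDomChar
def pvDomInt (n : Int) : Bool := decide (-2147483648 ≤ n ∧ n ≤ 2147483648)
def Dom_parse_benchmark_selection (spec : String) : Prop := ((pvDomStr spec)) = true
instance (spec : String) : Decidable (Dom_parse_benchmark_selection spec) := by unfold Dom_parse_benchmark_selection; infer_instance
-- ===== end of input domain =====

-- A dedups by inserting every expanded number into a hash set and sorting it; B never expands
-- duplicates: it parses each part into an (lo,hi) interval, sorts the intervals by lo, merges
-- overlapping/adjacent ones in one pass, and only then materialises the numbers.


-- ===== PORT A =====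
-- A's loop body: strip the part, on '-' split once and update the set with the inclusive range,
-- else add the single int.  `none` = the ValueError int() raises on a malformed piece.
def pvStepA (s? : Option (PySem.Set Int)) (part0 : String) : Option (PySem.Set Int) :=
  match s? with
  | none => none
  | some nums =>
    let part := PySem.Str.strip part0
    if PySem.Str.isIn "-" part then
      match (PySem.Str.splitMax? part "-" 1).getD [] with
      | [lo, hi] =>
        match PySem.Int.ofStr? lo, PySem.Int.ofStr? hi with
        | some l, some h => some (PySem.Set.update nums (PySem.List.pyRange l (h + 1) 1))
        | _, _ => none
      | _ => none
    else
      match PySem.Int.ofStr? part with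
      | some n => some (PySem.Set.add nums n)
      | none => none

def parse_benchmark_selection (spec : String) : List Int :=
  match ((PySem.Str.split? spec ",").getD []).foldl pvStepA (some PySem.Set.empty) with
  | some nums => PySem.List.sorted nums (fun x => x) false
  | none => []

-- ===== PORT B =====
-- B's parsing loop body: same parsing, but collect the (lo, hi) interval (n ↦ (n, n)).
def pvStepB (a? : Option (List (Int × Int))) (part0 : String) : Option (List (Int × Int)) :=
  match a? with
  | none => none
  | some ivs =>
    let part := PySem.Str.strip part0
    if PySem.Str.isIn "-" part then
      match (PySem.Str.splitMax? part "-" 1).getD [] with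
      | [lo, hi] =>
        match PySem.Int.ofStr? lo, PySem.Int.ofStr? hi with
        | some l, some h => some (ivs ++ [(l, h)])
        | _, _ => none
      | _ => none
    else
      match PySem.Int.ofStr? part with
      | some n => some (ivs ++ [(n, n)])
      | none => none

-- B's merge loop body over the lo-sorted intervals (merged[-1] read/written via getLast?/dropLast)
def pvMergeStep (merged : List (Int × Int)) (iv : Int × Int) : List (Int × Int) :=
  if iv.2 < iv.1 then merged
  else
    match merged.getLast? with
    | some m =>
      if iv.1 ≤ m.2 + 1 then
        if m.2 < iv.2 then merged.dropLast ++ [(m.1, iv.2)] else merged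
      else merged ++ [iv]
    | none => merged ++ [iv]

def parse_benchmark_selection_alt (spec : String) : List Int :=
  match ((PySem.Str.split? spec ",").getD []).foldl pvStepB (some []) with
  | some ivs =>
    let sortedIvs := PySem.List.sorted ivs (fun iv => iv.1) false
    let merged := sortedIvs.foldl pvMergeStep []
    merged.foldl (fun out iv => out ++ PySem.List.pyRange iv.1 (iv.2 + 1) 1) []
  | none => []

-- ===== PRECONDITION & SPEC =====
-- Pre_ admits exactly the specs A returns on: every comma-separated part, once stripped, is a
-- valid int, or contains '-' and both pieces of its first '-'-split are valid ints; otherwise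
-- int() raises ValueError in both A and B.
def pvPartOK (part0 : String) : Bool :=
  let part := PySem.Str.strip part0
  if PySem.Str.isIn "-" part then
    match (PySem.Str.splitMax? part "-" 1).getD [] with
    | [lo, hi] => (PySem.Int.ofStr? lo).isSome && (PySem.Int.ofStr? hi).isSome
    | _ => false
  else (PySem.Int.ofStr? part).isSome

def Pre_parse_benchmark_selection (spec : String) : Prop :=
  ∀ p ∈ (PySem.Str.split? spec ",").getD [], pvPartOK p = true
instance (spec : String) : Decidable (Pre_parse_benchmark_selection spec) := by
  unfold Pre_parse_benchmark_selection; infer_instance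

def pvWitness_parse_benchmark_selection : String := "1, 5,3-6, 5"

def Spec_parse_benchmark_selection (spec : String) (out : List Int) : Prop := out = parse_benchmark_selection_alt spec
instance (spec : String) (out : List Int) : Decidable (Spec_parse_benchmark_selection spec out) := by unfold Spec_parse_benchmark_selection; infer_instance

-- ===== CLAIM (what is proved, stated in full; the proofs are below) =====
def Claim_equal_parse_benchmark_selection : Prop := ∀ (spec : String), Dom_parse_benchmark_selection spec → Pre_parse_benchmark_selection spec → Spec_parse_benchmark_selection spec (parse_benchmark_selection spec)

-- ===== LEMMAS AND PROOFS =====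

-- the interval a (valid) part denotes
def pvIv (part0 : String) : Int × Int :=
  let part := PySem.Str.strip part0
  if PySem.Str.isIn "-" part then
    match (PySem.Str.splitMax? part "-" 1).getD [] with
    | [lo, hi] => ((PySem.Int.ofStr? lo).getD 0, (PySem.Int.ofStr? hi).getD 0)
    | _ => (0, 0)
  else ((PySem.Int.ofStr? part).getD 0, (PySem.Int.ofStr? part).getD 0)

-- the ints a (valid) part contributes in A
def pvInts (part0 : String) : List Int :=
  PySem.List.pyRange (pvIv part0).1 ((pvIv part0).2 + 1) 1

lemma pvStepA_ok (part0 : String) (s : PySem.Set Int) (h : pvPartOK part0 = true) :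
    pvStepA (some s) part0 = some (PySem.Set.update s (pvInts part0)) := by
  unfold pvStepA pvPartOK pvInts pvIv at *
  dsimp only at h ⊢
  by_cases hin : PySem.Str.isIn "-" (PySem.Str.strip part0) = true
  all_goals simp only [hin, if_true, if_false, Bool.false_eq_true] at h ⊢
  · rcases hm : (PySem.Str.splitMax? (PySem.Str.strip part0) "-" 1).getD [] with _ | ⟨lo, t⟩
    · simp [hm] at h
    · rcases t with _ | ⟨hi, t'⟩
      · simp [hm] at h
      · rcases t' with _ | _
        · simp only [hm] at h ⊢
          rcases hl : PySem.Int.ofStr? lo with _ | l <;> rcases hh : PySem.Int.ofStr? hi with _ | hv <;>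
            simp [hl, hh] at h ⊢
        · simp [hm] at h
  · rcases hn : PySem.Int.ofStr? (PySem.Str.strip part0) with _ | n
    · simp [hn] at h
    · simp [PySem.Set.update, PySem.List.pyRange_one_singleton, List.foldl]

lemma pvStepB_ok (part0 : String) (a : List (Int × Int)) (h : pvPartOK part0 = true) :
    pvStepB (some a) part0 = some (a ++ [pvIv part0]) := by
  unfold pvStepB pvPartOK pvIv at *
  dsimp only at h ⊢
  by_cases hin : PySem.Str.isIn "-" (PySem.Str.strip part0) = true
  all_goals simp only [hin, if_true, if_false, Bool.false_eq_true] at h ⊢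
  · rcases hm : (PySem.Str.splitMax? (PySem.Str.strip part0) "-" 1).getD [] with _ | ⟨lo, t⟩
    · simp [hm] at h
    · rcases t with _ | ⟨hi, t'⟩
      · simp [hm] at h
      · rcases t' with _ | _
        · simp only [hm] at h ⊢
          rcases hl : PySem.Int.ofStr? lo with _ | l <;> rcases hh : PySem.Int.ofStr? hi with _ | hv <;>
            simp [hl, hh] at h ⊢
        · simp [hm] at h
  · rcases hn : PySem.Int.ofStr? (PySem.Str.strip part0) with _ | n
    · simp [hn] at h
    · simp [hn]

lemma pvFoldA (parts : List String) (hok : ∀ p ∈ parts, pvPartOK p = true) :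
    ∀ s : PySem.Set Int,
      parts.foldl pvStepA (some s) = some (PySem.Set.update s (parts.flatMap pvInts)) := by
  induction parts with
  | nil => intro s; simp [PySem.Set.update]
  | cons p rest ih =>
    intro s
    have hp := hok p (by simp)
    rw [List.foldl_cons, pvStepA_ok p s hp, ih (fun q hq => hok q (by simp [hq]))]
    simp [PySem.Set.update, List.foldl_append]

lemma pvFoldB (parts : List String) (hok : ∀ p ∈ parts, pvPartOK p = true) :
    ∀ a : List (Int × Int),
      parts.foldl pvStepB (some a) = some (a ++ parts.map pvIv) := by
  induction parts with
  | nil => intro a; simp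
  | cons p rest ih =>
    intro a
    have hp := hok p (by simp)
    rw [List.foldl_cons, pvStepB_ok p a hp, ih (fun q hq => hok q (by simp [hq]))]
    simp

-- membership in the union of a list of intervals
def pvCov (ivs : List (Int × Int)) (x : Int) : Prop := ∃ q ∈ ivs, q.1 ≤ x ∧ x ≤ q.2

lemma pvCov_nil (x : Int) : pvCov [] x ↔ False := by simp [pvCov]

lemma pvCov_cons (iv : Int × Int) (t : List (Int × Int)) (x : Int) :
    pvCov (iv :: t) x ↔ (iv.1 ≤ x ∧ x ≤ iv.2) ∨ pvCov t x := by
  simp [pvCov, List.mem_cons, or_and_right, exists_or]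

lemma pvCov_append (l1 l2 : List (Int × Int)) (x : Int) :
    pvCov (l1 ++ l2) x ↔ pvCov l1 x ∨ pvCov l2 x := by
  simp [pvCov, List.mem_append, or_and_right, exists_or]

-- the merge pass: invariants in, separated nonempty intervals covering the same ints out
lemma pvMerge : ∀ (ivs merged : List (Int × Int)),
    ivs.Pairwise (fun p q => p.1 ≤ q.1) →
    merged.Pairwise (fun p q => p.2 + 1 < q.1) →
    (∀ p ∈ merged, p.1 ≤ p.2) →
    (∀ p ∈ merged, ∀ iv ∈ ivs, p.1 ≤ iv.1) →
    (ivs.foldl pvMergeStep merged).Pairwise (fun p q => p.2 + 1 < q.1) ∧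
    (∀ p ∈ ivs.foldl pvMergeStep merged, p.1 ≤ p.2) ∧
    (∀ x, pvCov (ivs.foldl pvMergeStep merged) x ↔ pvCov merged x ∨ pvCov ivs x) := by
  intro ivs
  induction ivs with
  | nil =>
    intro merged _ hP hNE _
    exact ⟨hP, hNE, fun x => by simp [pvCov_nil]⟩
  | cons iv rest ih =>
    intro merged hs hP hNE hLo
    obtain ⟨hle, hs'⟩ := List.pairwise_cons.mp hs
    rw [List.foldl_cons]
    suffices h : (pvMergeStep merged iv).Pairwise (fun p q => p.2 + 1 < q.1) ∧
        (∀ p ∈ pvMergeStep merged iv, p.1 ≤ p.2) ∧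
        (∀ p ∈ pvMergeStep merged iv, ∀ q ∈ rest, p.1 ≤ q.1) ∧
        (∀ x, pvCov (pvMergeStep merged iv) x ↔ pvCov merged x ∨ (iv.1 ≤ x ∧ x ≤ iv.2)) by
      obtain ⟨h1, h2, h3, h4⟩ := h
      obtain ⟨g1, g2, g3⟩ := ih _ hs' h1 h2 h3
      refine ⟨g1, g2, fun x => ?_⟩
      rw [g3 x, h4 x, pvCov_cons]
      tauto
    unfold pvMergeStep
    by_cases hempty : iv.2 < iv.1
    · rw [if_pos hempty]
      refine ⟨hP, hNE, fun p hp q hq => hLo p hp q (by simp [hq]), fun x => ?_⟩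
      constructor
      · exact Or.inl
      · rintro (h | h)
        · exact h
        · omega
    · rw [if_neg hempty]
      rcases List.eq_nil_or_concat merged with rfl | ⟨ms, m, rfl⟩
      · simp only [List.getLast?_nil, List.nil_append]
        refine ⟨by simp, by simp; omega, ?_, fun x => ?_⟩
        · intro p hp q hq
          simp only [List.mem_singleton] at hp
          subst hp
          exact hle q hq
        · simp only [pvCov_cons, pvCov_nil]
          tauto
      · simp only [List.concat_eq_append] at hP hNE hLo ⊢
        rw [List.getLast?_concat]
        dsimp only
        have hmem_m : m ∈ ms ++ [m] := by simp
        have hm_ne : m.1 ≤ m.2 := hNE m hmem_m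
        have hm_lo : m.1 ≤ iv.1 := hLo m hmem_m iv (by simp)
        obtain ⟨hPms, _, hcross⟩ := List.pairwise_append.mp hP
        have hcross' : ∀ p ∈ ms, p.2 + 1 < m.1 := fun p hp => hcross p hp m (by simp)
        by_cases hclose : iv.1 ≤ m.2 + 1
        · rw [if_pos hclose]
          by_cases hext : m.2 < iv.2
          · rw [if_pos hext, List.dropLast_concat]
            refine ⟨?_, ?_, ?_, fun x => ?_⟩
            · rw [List.pairwise_append]
              exact ⟨hPms, by simp, fun p hp q hq => by
                simp only [List.mem_singleton] at hq; subst hq; exact hcross' p hp⟩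
            · intro p hp
              rcases List.mem_append.mp hp with h | h
              · exact hNE p (by simp [h])
              · simp only [List.mem_singleton] at h; subst h; dsimp; omega
            · intro p hp q hq
              rcases List.mem_append.mp hp with h | h
              · exact hLo p (by simp [h]) q (by simp [hq])
              · simp only [List.mem_singleton] at h; subst h; dsimp
                exact le_trans hm_lo (hle q hq)
            · rw [pvCov_append, pvCov_cons, pvCov_nil, pvCov_append, pvCov_cons, pvCov_nil]
              dsimp
              have harith : (m.1 ≤ x ∧ x ≤ iv.2) ↔
                  ((m.1 ≤ x ∧ x ≤ m.2) ∨ (iv.1 ≤ x ∧ x ≤ iv.2)) := by omega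
              rw [harith]
              tauto
          · rw [if_neg hext]
            refine ⟨hP, hNE, fun p hp q hq => hLo p hp q (by simp [hq]), fun x => ?_⟩
            constructor
            · exact Or.inl
            · rintro (h | h)
              · exact h
              · exact ⟨m, hmem_m, by omega⟩
        · rw [if_neg hclose]
          have hsep : ∀ p ∈ ms ++ [m], p.2 + 1 < iv.1 := by
            intro p hp
            rcases List.mem_append.mp hp with h | h
            · have := hcross' p h; omega
            · simp only [List.mem_singleton] at h; subst h; omega
          refine ⟨?_, ?_, ?_, fun x => ?_⟩
          · rw [List.pairwise_append]
            exact ⟨hP, by simp, fun p hp q hq => by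
              simp only [List.mem_singleton] at hq; subst hq; exact hsep p hp⟩
          · intro p hp
            rcases List.mem_append.mp hp with h | h
            · exact hNE p h
            · simp only [List.mem_singleton] at h; subst h; omega
          · intro p hp q hq
            rcases List.mem_append.mp hp with h | h
            · exact hLo p h q (by simp [hq])
            · simp only [List.mem_singleton] at h; subst h; exact hle q hq
          · rw [pvCov_append, pvCov_cons, pvCov_nil]
            tauto

-- expansion of separated intervals is strictly increasing and covers their union
lemma pvExpandAux (merged : List (Int × Int))
    (h1 : merged.Pairwise (fun p q => p.2 + 1 < q.1)) :
    (merged.flatMap (fun iv => PySem.List.pyRange iv.1 (iv.2 + 1) 1)).Pairwise (· < ·) ∧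
    (∀ x, x ∈ merged.flatMap (fun iv => PySem.List.pyRange iv.1 (iv.2 + 1) 1) ↔ pvCov merged x) := by
  induction merged with
  | nil => simp [pvCov]
  | cons iv t ih =>
    obtain ⟨hhead, htail⟩ := List.pairwise_cons.mp h1
    obtain ⟨ihp, ihm⟩ := ih htail
    constructor
    · rw [List.flatMap_cons, List.pairwise_append]
      refine ⟨PySem.List.pairwise_lt_pyRange_one _ _, ihp, ?_⟩
      intro a ha b hb
      rw [PySem.List.mem_pyRange_one] at ha
      rw [List.mem_flatMap] at hb
      obtain ⟨q, hq, hbq⟩ := hb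
      rw [PySem.List.mem_pyRange_one] at hbq
      have := hhead q hq
      omega
    · intro x
      rw [List.flatMap_cons, List.mem_append, PySem.List.mem_pyRange_one, ihm x, pvCov_cons]
      exact or_congr (by constructor <;> (rintro ⟨ha, hb⟩; exact ⟨ha, by omega⟩)) Iff.rfl

lemma pvExpand (merged : List (Int × Int))
    (h1 : merged.Pairwise (fun p q => p.2 + 1 < q.1)) :
    (merged.foldl (fun out iv => out ++ PySem.List.pyRange iv.1 (iv.2 + 1) 1) []).Pairwise (· < ·) ∧
    (∀ x, x ∈ merged.foldl (fun out iv => out ++ PySem.List.pyRange iv.1 (iv.2 + 1) 1) [] ↔ pvCov merged x) := by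
  rw [PySem.List.foldl_append_eq_flatMap]
  simpa using pvExpandAux merged h1

-- two strictly increasing lists with the same members are equal
lemma pvStrictExt (l1 l2 : List Int) (h1 : l1.Pairwise (· < ·)) (h2 : l2.Pairwise (· < ·))
    (hm : ∀ x, x ∈ l1 ↔ x ∈ l2) : l1 = l2 :=
  ((List.perm_ext_iff_of_nodup h1.nodup h2.nodup).mpr hm).eq_of_pairwise
    (fun _ _ _ _ h h' => absurd h' (not_lt.2 h.le)) h1 h2

-- ===== VERDICT (by name: the statement is the Claim_ definition above) =====
theorem parse_benchmark_selection_spec : Claim_equal_parse_benchmark_selection := by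
  intro spec _ hpre
  unfold Spec_parse_benchmark_selection parse_benchmark_selection parse_benchmark_selection_alt
  have hok : ∀ p ∈ (PySem.Str.split? spec ",").getD [], pvPartOK p = true := hpre
  set parts := (PySem.Str.split? spec ",").getD [] with hparts
  rw [pvFoldA parts hok PySem.Set.empty, pvFoldB parts hok []]
  simp only [List.nil_append]
  set ivs := parts.map pvIv with hivs
  set sortedIvs := PySem.List.sorted ivs (fun iv => iv.1) false with hsi
  have hsp : sortedIvs.Pairwise (fun p q => p.1 ≤ q.1) := PySem.List.sorted_pairwise ivs _
  have hM := pvMerge sortedIvs [] hsp (by simp) (by simp) (by simp)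
  have hE := pvExpand (sortedIvs.foldl pvMergeStep []) hM.1
  have hupd : PySem.Set.update PySem.Set.empty (parts.flatMap pvInts) = PySem.Set.ofList (parts.flatMap pvInts) :=
    PySem.Set.update_nil_left _
  rw [hupd]
  apply pvStrictExt _ _ (PySem.List.sorted_ofList_pairwise_lt _) hE.1
  intro x
  rw [PySem.List.mem_sorted, PySem.Set.mem_ofList, hE.2 x, hM.2.2 x]
  simp only [pvCov, List.mem_flatMap, pvInts]
  constructor
  · rintro ⟨p, hp, hx⟩
    rw [PySem.List.mem_pyRange_one] at hx
    refine Or.inr ⟨pvIv p, ?_, hx.1, by omega⟩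
    rw [hsi, PySem.List.mem_sorted, hivs]
    exact List.mem_map_of_mem hp
  · rintro (h | ⟨q, hq, hx⟩)
    · simp at h
    · rw [hsi, PySem.List.mem_sorted, hivs, List.mem_map] at hq
      obtain ⟨p, hp, rfl⟩ := hq
      exact ⟨p, hp, by rw [PySem.List.mem_pyRange_one]; omega⟩
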